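-- pv_equiv track=rewrite | github.com/desdai/SciEvent | data_scripts/shared/prepare_all_data.py | _match_arg_texts
-- ===== SOURCE A (Python) =====
-- from collections import OrderedDict, defaultdict
-- from typing import Any, Dict, List, Tuple, Optional, Optional, Optional
--
-- def _match_arg_texts(annotation_args: List[Dict[str, Any]],
--                      arg_texts: List[Dict[str, Any]]) -> List[Optional[str]]:
--     """
--     Greedy matching of texts to args by (entity_id, role), in order.
--     Returns a list of texts aligned with annotation_args.
--     """
--     # Build buckets keyed by (entity_id, role) -> list of texts (in order)
--     buckets: Dict[Tuple[Any, Any], List[str]] = defaultdict(list)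
--     for at in arg_texts or []:
--         key = (at.get("entity_id"), at.get("role"))
--         if at.get("text") is not None:
--             buckets[key].append(at["text"])
--
--     out_texts: List[Optional[str]] = []
--     for a in annotation_args:
--         key = (a.get("entity_id"), a.get("role"))
--         lst = buckets.get(key, [])
--         if lst:
--             out_texts.append(lst.pop(0))
--         else:
--             out_texts.append(None)
--     return out_texts
-- ===== SOURCE B (Python) =====
-- def _match_arg_texts(annotation_args, arg_texts):
--     """Same matching, no bucket table: keep a shrinking 'remaining' list and
--     linearly scan it for the first unconsumed entry with the wanted key."""
--     remaining = list(arg_texts or [])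
--     out = []
--     for a in annotation_args:
--         key = (a.get("entity_id"), a.get("role"))
--         hit = None
--         for i, at in enumerate(remaining):
--             if (at.get("entity_id"), at.get("role")) == key and at.get("text") is not None:
--                 hit = i
--                 break
--         if hit is None:
--             out.append(None)
--         else:
--             out.append(remaining[hit]["text"])
--             del remaining[hit]
--     return out
-- ===== Notes on version B (the rewrite author's own statement) =====
-- stated objective: alternative
-- what changed: Replaces the precomputed defaultdict bucket table (key -> FIFO list of texts, consumed by pop(0)) with a single shrinking 'remaining' list that is linearly scanned for the first unconsumed matching entry, which is then deleted.
import Mathlib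
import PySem

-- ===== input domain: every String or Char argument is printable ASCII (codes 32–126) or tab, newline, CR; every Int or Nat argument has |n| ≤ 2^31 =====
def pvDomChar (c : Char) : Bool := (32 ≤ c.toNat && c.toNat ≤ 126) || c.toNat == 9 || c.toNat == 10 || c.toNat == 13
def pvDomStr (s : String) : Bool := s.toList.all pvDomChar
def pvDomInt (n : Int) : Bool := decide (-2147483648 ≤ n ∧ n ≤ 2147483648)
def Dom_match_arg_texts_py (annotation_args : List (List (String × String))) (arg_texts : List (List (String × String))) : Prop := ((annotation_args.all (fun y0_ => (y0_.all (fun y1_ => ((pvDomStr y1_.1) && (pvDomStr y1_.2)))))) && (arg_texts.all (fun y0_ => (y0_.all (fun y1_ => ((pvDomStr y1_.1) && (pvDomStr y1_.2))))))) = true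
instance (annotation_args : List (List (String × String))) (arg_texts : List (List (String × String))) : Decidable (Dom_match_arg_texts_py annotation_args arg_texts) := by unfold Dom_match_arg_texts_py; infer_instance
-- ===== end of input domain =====

-- ===== PORT A =====
-- B replaces A's bucket table with one shrinking list scanned per annotation arg (alternative, not faster).

-- `d.get(k)` on a Python dict given as an association list (later duplicate wins, as dict(...) does)
def pvGet (d : List (String × String)) (k : String) : Option String :=
  (PySem.Dict.ofList d).get? k

-- key = (a.get("entity_id"), a.get("role"))
def pvKey (a : List (String × String)) : Option String × Option String :=
  (pvGet a "entity_id", pvGet a "role")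

-- one step of A's bucket-building loop: if at.get("text") is not None: buckets[key].append(at["text"])
def pvBucketStep (d : PySem.Dict (Option String × Option String) (List String))
    (at_ : List (String × String)) : PySem.Dict (Option String × Option String) (List String) :=
  match pvGet at_ "text" with
  | some t => d.modify (pvKey at_) [] (fun l => l ++ [t])
  | none => d

-- A's output loop: lst = buckets.get(key, []); pop(0) mutates the bucket in place
def pvLoopA (anns : List (List (String × String)))
    (st : PySem.Dict (Option String × Option String) (List String) × List (Option String)) :
    PySem.Dict (Option String × Option String) (List String) × List (Option String) :=
  anns.foldl (fun st a =>
    match st.1.getD (pvKey a) [] with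
    | t :: ts => (st.1.insert (pvKey a) ts, st.2 ++ [some t])
    | [] => (st.1, st.2 ++ [none])) st

def match_arg_texts_py (annotation_args : List (List (String × String))) (arg_texts : List (List (String × String))) : List (Option String) :=
  let buckets := arg_texts.foldl pvBucketStep PySem.Dict.empty
  (pvLoopA annotation_args (buckets, [])).2

-- ===== PORT B =====
-- inner scan of Source B: first remaining entry whose key matches and whose text is not None;
-- returns its text together with the remaining list after `del remaining[hit]`
def pvFindRemove (k : Option String × Option String) :
    List (List (String × String)) → Option (String × List (List (String × String)))
  | [] => none
  | e :: rest =>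
    match (if pvKey e = k then pvGet e "text" else none) with
    | some t => some (t, rest)
    | none => (pvFindRemove k rest).map (fun p => (p.1, e :: p.2))

def pvLoopB (anns : List (List (String × String))) (remaining : List (List (String × String))) :
    List (Option String) :=
  match anns with
  | [] => []
  | a :: as_ =>
    match pvFindRemove (pvKey a) remaining with
    | some (t, rem') => some t :: pvLoopB as_ rem'
    | none => none :: pvLoopB as_ remaining

def match_arg_texts_py_alt (annotation_args : List (List (String × String))) (arg_texts : List (List (String × String))) : List (Option String) :=
  pvLoopB annotation_args arg_texts

-- ===== PRECONDITION & SPEC =====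
def Spec_match_arg_texts_py (annotation_args : List (List (String × String))) (arg_texts : List (List (String × String))) (out : List (Option String)) : Prop := out = match_arg_texts_py_alt annotation_args arg_texts
instance (annotation_args : List (List (String × String))) (arg_texts : List (List (String × String))) (out : List (Option String)) : Decidable (Spec_match_arg_texts_py annotation_args arg_texts out) := by unfold Spec_match_arg_texts_py; infer_instance

-- ===== CLAIM (what is proved, stated in full; the proofs are below) =====
def Claim_equal_match_arg_texts_py : Prop := ∀ (annotation_args : List (List (String × String))) (arg_texts : List (List (String × String))), Dom_match_arg_texts_py annotation_args arg_texts → Spec_match_arg_texts_py annotation_args arg_texts (match_arg_texts_py annotation_args arg_texts)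

-- ===== LEMMAS AND PROOFS =====

-- the texts still available for key k in a remaining list
def pvMatches (k : Option String × Option String) (l : List (List (String × String))) : List String :=
  l.filterMap (fun e => if pvKey e = k then pvGet e "text" else none)

theorem pvMatches_cons (k : Option String × Option String) (e : List (String × String))
    (l : List (List (String × String))) :
    pvMatches k (e :: l) = ((if pvKey e = k then pvGet e "text" else none).toList) ++ pvMatches k l := by
  cases h : (if pvKey e = k then pvGet e "text" else none) <;>
    simp [pvMatches, h]

-- the bucket loop of A computes exactly pvMatches
theorem pvBuckets_getD (l : List (List (String × String)))
    (d : PySem.Dict (Option String × Option String) (List String))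
    (k : Option String × Option String) :
    (l.foldl pvBucketStep d).getD k [] = d.getD k [] ++ pvMatches k l := by
  induction l generalizing d with
  | nil => simp [pvMatches]
  | cons e l ih =>
    rw [List.foldl_cons, ih, pvMatches_cons]
    unfold pvBucketStep
    cases h : pvGet e "text" with
    | none => simp
    | some t =>
      rw [PySem.Dict.getD_modify]
      by_cases hk : pvKey e = k
      · subst hk; simp
      · simp [hk, Ne.symm hk]

theorem pvFindRemove_none (k : Option String × Option String) (rem : List (List (String × String)))
    (h : pvFindRemove k rem = none) : pvMatches k rem = [] := by
  induction rem with
  | nil => rfl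
  | cons e rest ih =>
    rw [pvMatches_cons]
    unfold pvFindRemove at h
    cases hc : (if pvKey e = k then pvGet e "text" else none) with
    | some t => rw [hc] at h; simp at h
    | none =>
      rw [hc] at h
      simp only [Option.map_eq_none_iff] at h
      simp [ih h]

theorem pvFindRemove_some (k : Option String × Option String) (rem rem' : List (List (String × String)))
    (t : String) (h : pvFindRemove k rem = some (t, rem')) :
    pvMatches k rem = t :: pvMatches k rem' ∧
      ∀ k', k' ≠ k → pvMatches k' rem' = pvMatches k' rem := by
  induction rem generalizing rem' with
  | nil => simp [pvFindRemove] at h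
  | cons e rest ih =>
    unfold pvFindRemove at h
    cases hc : (if pvKey e = k then pvGet e "text" else none) with
    | some t0 =>
      rw [hc] at h
      simp only [Option.some.injEq, Prod.mk.injEq] at h
      obtain ⟨rfl, rfl⟩ := h
      constructor
      · rw [pvMatches_cons, hc]; rfl
      · intro k' hk'
        rw [pvMatches_cons]
        have hke : pvKey e = k := by
          by_contra hne; simp [hne] at hc
        simp [hke, hk'.symm]
    | none =>
      rw [hc] at h
      cases hr : pvFindRemove k rest with
      | none => rw [hr] at h; simp at h
      | some p =>
        obtain ⟨t0, r0⟩ := p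
        rw [hr] at h
        simp only [Option.map_some, Option.some.injEq, Prod.mk.injEq] at h
        obtain ⟨rfl, rfl⟩ := h
        obtain ⟨h1, h2⟩ := ih r0 hr
        refine ⟨?_, ?_⟩
        · rw [pvMatches_cons, hc, pvMatches_cons, hc]
          simpa using h1
        · intro k' hk'
          rw [pvMatches_cons, pvMatches_cons, h2 k' hk']

-- main invariant: whenever the buckets describe exactly what is left in `remaining`,
-- A's foldl and B's recursion produce the same suffix
theorem pvLoop_eq (anns : List (List (String × String)))
    (rem : List (List (String × String)))
    (d : PySem.Dict (Option String × Option String) (List String))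
    (acc : List (Option String))
    (hinv : ∀ k, d.getD k [] = pvMatches k rem) :
    (pvLoopA anns (d, acc)).2 = acc ++ pvLoopB anns rem := by
  induction anns generalizing rem d acc with
  | nil => simp [pvLoopA, pvLoopB]
  | cons a as_ ih =>
    rw [pvLoopA, List.foldl_cons]
    cases hf : pvFindRemove (pvKey a) rem with
    | none =>
      have hl : d.getD (pvKey a) [] = [] := by
        rw [hinv, pvFindRemove_none _ _ hf]
      simp only [hl]
      rw [pvLoopB, hf]
      have := ih rem d (acc ++ [none]) hinv
      rw [pvLoopA] at this
      rw [this]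
      simp
    | some p =>
      obtain ⟨t, rem'⟩ := p
      obtain ⟨h1, h2⟩ := pvFindRemove_some _ _ _ _ hf
      have hl : d.getD (pvKey a) [] = t :: pvMatches (pvKey a) rem' := by
        rw [hinv, h1]
      simp only [hl]
      rw [pvLoopB, hf]
      have hinv' : ∀ k, (d.insert (pvKey a) (pvMatches (pvKey a) rem')).getD k [] = pvMatches k rem' := by
        intro k
        rw [PySem.Dict.getD_insert]
        by_cases hk : k = pvKey a
        · simp [hk]
        · simp [hk, hinv k, h2 k hk]
      have := ih rem' _ (acc ++ [some t]) hinv'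
      rw [pvLoopA] at this
      rw [this]
      simp

-- ===== VERDICT (by name: the statement is the Claim_ definition above) =====
theorem match_arg_texts_py_spec : Claim_equal_match_arg_texts_py := by
  intro annotation_args arg_texts _
  unfold Spec_match_arg_texts_py match_arg_texts_py match_arg_texts_py_alt
  exact pvLoop_eq annotation_args arg_texts _ []
    (fun k => by rw [pvBuckets_getD]; simp [PySem.Dict.getD_empty])
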